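-- pv_equiv track=rewrite | github.com/hanbinliuu/zh_trackinglineYM | lhb_exp/ekf_xy_demo.py | match_timestamp
-- ===== SOURCE A (Python) =====
-- def match_timestamp(short_ts, long_ts):
--     # 数据处理代码
--     matches_indices = []
--     available_indices = list(range(len(long_ts)))
--
--     for a_val in short_ts:
--         min_distance = float('inf')
--         closest_index = None
--
--         for i in available_indices:
--             b_val = long_ts[i]
--             distance = abs(a_val - b_val)
--
--             if distance < min_distance:
--                 min_distance = distance
--                 closest_index = i
--
--         if closest_index is not None:
--             matches_indices.append(closest_index)
--             available_indices.remove(closest_index)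
--
--     return matches_indices
-- ===== SOURCE B (Python) =====
-- # B: keep the unused long_ts entries as a list of (value, index) pairs sorted
-- # lexicographically; each query binary-searches for the two neighbouring value
-- # runs and picks the best of (at most) two candidates instead of scanning all
-- # remaining entries.
--
-- def _bisect_val(pairs, x):
--     # first position whose value component is >= x (hand-rolled: A imports nothing)
--     lo, hi = 0, len(pairs)
--     while lo < hi:
--         mid = (lo + hi) // 2
--         if pairs[mid][0] < x:
--             lo = mid + 1
--         else:
--             hi = mid
--     return lo
--
-- def match_timestamp(short_ts, long_ts):
--     pairs = sorted((v, i) for i, v in enumerate(long_ts))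
--     matches = []
--     for a in short_ts:
--         if not pairs:
--             continue
--         j = _bisect_val(pairs, a)
--         cand = []
--         if j < len(pairs):
--             cand.append(j)              # first entry of the value-run at/above a
--         if j > 0:
--             cand.append(_bisect_val(pairs, pairs[j - 1][0]))  # first entry of the run below a
--         best = min(cand, key=lambda t: (abs(a - pairs[t][0]), pairs[t][1]))
--         matches.append(pairs[best][1])
--         pairs = pairs[:best] + pairs[best + 1:]
--     return matches
-- ===== Notes on version B (the rewrite author's own statement) =====
-- stated objective: faster
-- what changed: B keeps the unused long_ts entries as a lexicographically sorted list of (value, index) pairs and answers each query by binary-searching for the two neighbouring value runs (at most two candidates, tie broken by smallest original index) instead of scanning every remaining index; the matched pair is deleted by position.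
import Mathlib
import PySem

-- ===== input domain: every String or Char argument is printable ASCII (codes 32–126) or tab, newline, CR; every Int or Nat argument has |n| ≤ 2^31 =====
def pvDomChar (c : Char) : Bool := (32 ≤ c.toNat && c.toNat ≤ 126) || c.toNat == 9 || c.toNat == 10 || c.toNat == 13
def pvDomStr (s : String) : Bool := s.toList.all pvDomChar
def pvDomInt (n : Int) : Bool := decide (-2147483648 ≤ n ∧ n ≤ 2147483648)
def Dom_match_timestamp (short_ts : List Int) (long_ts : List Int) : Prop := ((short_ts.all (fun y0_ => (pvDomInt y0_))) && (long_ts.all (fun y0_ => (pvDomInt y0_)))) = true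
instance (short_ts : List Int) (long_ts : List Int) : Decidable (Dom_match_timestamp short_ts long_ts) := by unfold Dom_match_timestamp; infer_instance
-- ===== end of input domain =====

-- B replaces A's O(m) scan of the remaining long_ts indices per query by a binary
-- search over the remaining (value, index) pairs kept lexicographically sorted
-- (at most two candidate runs per query); measured constant-factor speed-up.

-- ===== PORT A =====
-- inner loop body: state = (min_distance, closest_index); min_distance starts as
-- float('inf'), modelled as `none` (every int distance compares < inf, so the
-- first comparison always updates — exact on Int inputs).
def pvAStep (a_val : Int) (long_ts : List Int) (st : Option Int × Option Int) (i : Int) : Option Int × Option Int :=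
  -- b_val = long_ts[i]; i comes from range(len(long_ts)) and stays in range, so the default is unreachable
  let b_val := (PySem.List.pyGet? long_ts i).getD 0
  let distance := |a_val - b_val|
  match st.1 with
  | none => (some distance, some i)
  | some m => if distance < m then (some distance, some i) else st

def match_timestamp (short_ts : List Int) (long_ts : List Int) : List Int :=
  (short_ts.foldl (fun (st : List Int × List Int) a_val =>
      match (st.2.foldl (pvAStep a_val long_ts) (none, none)).2 with
      | some c => (st.1 ++ [c], (PySem.List.remove? st.2 c).getD st.2)  -- closest is in avail: remove? is `some`
      | none => st)
    ([], PySem.List.pyRange 0 (long_ts.length : Int) 1)).1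

-- ===== PORT B =====
-- hand-rolled bisect (Source B imports nothing): first position whose value component is >= x
def pvBisectGo (pairs : List (Int × Int)) (x : Int) (lo hi : Nat) : Nat :=
  if h : lo < hi then
    let mid := (lo + hi) / 2     -- (lo+hi)//2 on non-negative ints = Nat division
    if (pairs.getD mid (0, 0)).1 < x then pvBisectGo pairs x (mid + 1) hi  -- mid < hi ≤ len: default unreachable
    else pvBisectGo pairs x lo mid
  else lo
termination_by hi - lo
decreasing_by all_goals omega

def pvBisectVal (pairs : List (Int × Int)) (x : Int) : Nat := pvBisectGo pairs x 0 pairs.length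

def match_timestamp_alt (short_ts : List Int) (long_ts : List Int) : List Int :=
  -- pairs = sorted((v, i) for i, v in enumerate(long_ts))  (tuple order = lex on (value, index))
  (short_ts.foldl (fun (st : List Int × List (Int × Int)) a =>
      let pairs := st.2
      if pairs.isEmpty then st
      else
        let j := pvBisectVal pairs a
        -- conditional appends building cand; all positions are in range, defaults unreachable
        let cand : List Nat :=
          (if j < pairs.length then [j] else []) ++
          (if 0 < j then [pvBisectVal pairs (pairs.getD (j - 1) (0, 0)).1] else [])
        -- best = min(cand, key=lambda t: (abs(a - pairs[t][0]), pairs[t][1])); cand ≠ []: getD unreachable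
        let best := (PySem.List.min2? cand
            (fun t => |a - (pairs.getD t (0, 0)).1|) (fun t => (pairs.getD t (0, 0)).2)).getD 0
        (st.1 ++ [(pairs.getD best (0, 0)).2],
         -- pairs[:best] + pairs[best+1:] with 0 ≤ best: plain take/drop
         pairs.take best ++ pairs.drop (best + 1)))
    ([], PySem.List.sorted2 ((PySem.List.enumerate long_ts).map (fun p => (p.2, p.1))) Prod.fst Prod.snd)).1

-- ===== PRECONDITION & SPEC =====
def Spec_match_timestamp (short_ts : List Int) (long_ts : List Int) (out : List Int) : Prop := out = match_timestamp_alt short_ts long_ts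
instance (short_ts : List Int) (long_ts : List Int) (out : List Int) : Decidable (Spec_match_timestamp short_ts long_ts out) := by unfold Spec_match_timestamp; infer_instance

-- ===== CLAIM (what is proved, stated in full; the proofs are below) =====
def Claim_equal_match_timestamp : Prop := ∀ (short_ts : List Int) (long_ts : List Int), Dom_match_timestamp short_ts long_ts → Spec_match_timestamp short_ts long_ts (match_timestamp short_ts long_ts)

-- ===== LEMMAS AND PROOFS =====
-- ---- basic notions ----

-- long_ts[i] as A reads it (i kept in range)
def pvVal (L : List Int) (i : Int) : Int := (PySem.List.pyGet? L i).getD 0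
-- the (value, index) pair of index i
def pvF (L : List Int) (i : Int) : Int × Int := (pvVal L i, i)
-- the selection key of a pair for query a: (distance, original index)
def pvKey (a : Int) (p : Int × Int) : Int × Int := (|a - p.1|, p.2)
-- strict lexicographic order on pairs (Python tuple <)
def pvLt (p q : Int × Int) : Prop := p.1 < q.1 ∨ (p.1 = q.1 ∧ p.2 < q.2)

theorem pvLt_trans {p q r : Int × Int} (h1 : pvLt p q) (h2 : pvLt q r) : pvLt p r := by
  obtain ⟨a, b⟩ := p; obtain ⟨c, d⟩ := q; obtain ⟨e, f⟩ := r
  simp only [pvLt] at *; omega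

theorem pvLt_asymm {p q : Int × Int} (h1 : pvLt p q) (h2 : pvLt q p) : False := by
  obtain ⟨a, b⟩ := p; obtain ⟨c, d⟩ := q
  simp only [pvLt] at *; omega

theorem pvLt_of_ne_of_not_gt {p q : Int × Int} (hne : p ≠ q) (h : ¬ pvLt q p) : pvLt p q := by
  obtain ⟨a, b⟩ := p; obtain ⟨c, d⟩ := q
  unfold pvLt at h ⊢
  dsimp only at h ⊢
  by_cases hac : a = c
  · subst hac
    have hbd : b ≠ d := fun hb => hne (by rw [hb])
    omega
  · omega

theorem pvF_inj (L : List Int) : Function.Injective (pvF L) := by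
  intro i j h; simpa [pvF] using congrArg Prod.snd h

-- the invariant tying A's available-index list S to B's sorted pair list P
def pvInv (L : List Int) (S : List Int) (P : List (Int × Int)) : Prop :=
  S.Pairwise (· < ·) ∧ P.Pairwise pvLt ∧ P.Perm (S.map (pvF L))

-- ---- A-side characterization ----

def pvComb (L : List Int) (a : Int) (b : Int × Int) (i : Int) : Int × Int :=
  if |a - pvVal L i| < b.1 then (|a - pvVal L i|, i) else b

theorem foldl_aStep_some (L : List Int) (a : Int) :
    ∀ (S : List Int) (m c : Int),
      S.foldl (pvAStep a L) (some m, some c) =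
        (some (S.foldl (pvComb L a) (m, c)).1, some (S.foldl (pvComb L a) (m, c)).2) := by
  intro S
  induction S with
  | nil => intro m c; rfl
  | cons x T ih =>
      intro m c
      simp only [List.foldl_cons]
      have hstep : pvAStep a L (some m, some c) x =
          (some (pvComb L a (m, c) x).1, some (pvComb L a (m, c) x).2) := by
        simp [pvAStep, pvComb, pvVal]
        split_ifs <;> rfl
      rw [hstep]
      exact ih (pvComb L a (m, c) x).1 (pvComb L a (m, c) x).2

theorem combChar (L : List Int) (a : Int) :
    ∀ (T : List Int) (c : Int), T.Pairwise (· < ·) → (∀ j ∈ T, c < j) →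
      (T.foldl (pvComb L a) (|a - pvVal L c|, c)).2 ∈ (c :: T) ∧
      (T.foldl (pvComb L a) (|a - pvVal L c|, c)) = pvKey a (pvF L (T.foldl (pvComb L a) (|a - pvVal L c|, c)).2) ∧
      (∀ j ∈ c :: T, j ≠ (T.foldl (pvComb L a) (|a - pvVal L c|, c)).2 →
         pvLt (pvKey a (pvF L (T.foldl (pvComb L a) (|a - pvVal L c|, c)).2)) (pvKey a (pvF L j))) := by
  intro T
  induction T with
  | nil =>
      intro c _ _
      refine ⟨by simp, rfl, ?_⟩
      intro j hj hne
      simp only [List.foldl_nil, List.mem_singleton] at hj hne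
      exact absurd hj hne
  | cons x T ih =>
      intro c hpw hgt
      obtain ⟨hxT, hpwT⟩ := List.pairwise_cons.mp hpw
      have hcx : c < x := hgt x List.mem_cons_self
      have hcT : ∀ j ∈ T, c < j := fun j hj => hgt j (List.mem_cons_of_mem _ hj)
      rw [List.foldl_cons]
      by_cases hlt : |a - pvVal L x| < |a - pvVal L c|
      · have hstep : pvComb L a (|a - pvVal L c|, c) x = (|a - pvVal L x|, x) := by
          simp [pvComb, hlt]
        rw [hstep]
        obtain ⟨hmem, hkey, hmin⟩ := ih x hpwT hxT
        have hkxc : pvLt (pvKey a (pvF L x)) (pvKey a (pvF L c)) := Or.inl hlt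
        refine ⟨?_, hkey, ?_⟩
        · rcases List.mem_cons.mp hmem with h | h
          · rw [h]; exact List.mem_cons_of_mem _ List.mem_cons_self
          · exact List.mem_cons_of_mem _ (List.mem_cons_of_mem _ h)
        · intro j hj hne
          rcases List.mem_cons.mp hj with rfl | hj'
          · by_cases hrx : (T.foldl (pvComb L a) (|a - pvVal L x|, x)).2 = x
            · rw [hrx]; exact hkxc
            · exact pvLt_trans (hmin x List.mem_cons_self (fun h => hrx h.symm)) hkxc
          · exact hmin j hj' hne
      · have hstep : pvComb L a (|a - pvVal L c|, c) x = (|a - pvVal L c|, c) := by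
          simp [pvComb, hlt]
        rw [hstep]
        obtain ⟨hmem, hkey, hmin⟩ := ih c hpwT hcT
        have hkcx : pvLt (pvKey a (pvF L c)) (pvKey a (pvF L x)) := by
          rcases lt_or_eq_of_le (not_lt.mp hlt) with h | h
          · exact Or.inl h
          · exact Or.inr ⟨h, hcx⟩
        refine ⟨?_, hkey, ?_⟩
        · rcases List.mem_cons.mp hmem with h | h
          · rw [h]; exact List.mem_cons_self
          · exact List.mem_cons_of_mem _ (List.mem_cons_of_mem _ h)
        · intro j hj hne
          rcases List.mem_cons.mp hj with rfl | hj'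
          · exact hmin j List.mem_cons_self hne
          · rcases List.mem_cons.mp hj' with rfl | hj''
            · by_cases hrc : (T.foldl (pvComb L a) (|a - pvVal L c|, c)).2 = c
              · rw [hrc]; exact hkcx
              · exact pvLt_trans (hmin c List.mem_cons_self (fun h => hrc h.symm)) hkcx
            · exact hmin j (List.mem_cons_of_mem _ hj'') hne

theorem scanChar (L : List Int) (a : Int) (S : List Int) (hS : S.Pairwise (· < ·)) (hne : S ≠ []) :
    ∃ c, (S.foldl (pvAStep a L) (none, none)).2 = some c ∧ c ∈ S ∧
      ∀ j ∈ S, j ≠ c → pvLt (pvKey a (pvF L c)) (pvKey a (pvF L j)) := by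
  obtain ⟨x, T, rfl⟩ : ∃ x T, S = x :: T := by
    cases S with
    | nil => exact absurd rfl hne
    | cons x T => exact ⟨x, T, rfl⟩
  obtain ⟨hxT, hpwT⟩ := List.pairwise_cons.mp hS
  have h1 : pvAStep a L (none, none) x = (some (|a - pvVal L x|), some x) := rfl
  rw [List.foldl_cons, h1, foldl_aStep_some]
  obtain ⟨hmem, hkey, hmin⟩ := combChar L a T x hpwT hxT
  refine ⟨(T.foldl (pvComb L a) (|a - pvVal L x|, x)).2, rfl, hmem, ?_⟩
  intro j hj hne
  have := hmin j hj hne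
  rwa [← hkey] at this ⊢

-- ---- B-side characterization ----

theorem bisectGo_spec (P : List (Int × Int)) (x : Int)
    (hmono : ∀ s t : Nat, s ≤ t → t < P.length → (P.getD s (0,0)).1 ≤ (P.getD t (0,0)).1) :
    ∀ (lo hi : Nat), lo ≤ hi → hi ≤ P.length →
      (∀ t, t < lo → (P.getD t (0,0)).1 < x) →
      (∀ t, hi ≤ t → t < P.length → x ≤ (P.getD t (0,0)).1) →
      lo ≤ pvBisectGo P x lo hi ∧ pvBisectGo P x lo hi ≤ hi ∧
      (∀ t, t < pvBisectGo P x lo hi → (P.getD t (0,0)).1 < x) ∧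
      (∀ t, pvBisectGo P x lo hi ≤ t → t < P.length → x ≤ (P.getD t (0,0)).1) := by
  suffices h : ∀ (fuel lo hi : Nat), hi - lo ≤ fuel → lo ≤ hi → hi ≤ P.length →
      (∀ t, t < lo → (P.getD t (0,0)).1 < x) →
      (∀ t, hi ≤ t → t < P.length → x ≤ (P.getD t (0,0)).1) →
      lo ≤ pvBisectGo P x lo hi ∧ pvBisectGo P x lo hi ≤ hi ∧
      (∀ t, t < pvBisectGo P x lo hi → (P.getD t (0,0)).1 < x) ∧
      (∀ t, pvBisectGo P x lo hi ≤ t → t < P.length → x ≤ (P.getD t (0,0)).1) by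
    intro lo hi h1 h2 h3 h4
    exact h (hi - lo) lo hi le_rfl h1 h2 h3 h4
  intro fuel
  induction fuel with
  | zero =>
      intro lo hi hfuel hle hhi h1 h2
      have heq : lo = hi := by omega
      rw [pvBisectGo]
      simp only [heq, Nat.lt_irrefl, dite_false]
      subst heq
      exact ⟨le_rfl, le_rfl, h1, h2⟩
  | succ n ihf =>
      intro lo hi hfuel hle hhi h1 h2
      by_cases hlh : lo < hi
      · have hmid2 : (lo + hi) / 2 < hi := by omega
        have hmid1 : lo ≤ (lo + hi) / 2 := by omega
        have hmidlen : (lo + hi) / 2 < P.length := lt_of_lt_of_le hmid2 hhi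
        rw [pvBisectGo]
        simp only [hlh, dite_true]
        by_cases hv : (P.getD ((lo + hi) / 2) (0,0)).1 < x
        · simp only [hv, if_true]
          have hres := ihf ((lo + hi) / 2 + 1) hi (by omega) (by omega) hhi
            (fun t ht => lt_of_le_of_lt (hmono t ((lo + hi) / 2) (by omega) hmidlen) hv) h2
          exact ⟨le_trans (by omega) hres.1, hres.2.1, hres.2.2.1, hres.2.2.2⟩
        · simp only [hv, if_false]
          have hres := ihf lo ((lo + hi) / 2) (by omega) hmid1 (le_of_lt hmidlen) h1
            (fun t ht htl => le_trans (not_lt.mp hv) (hmono ((lo + hi) / 2) t ht htl))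
          exact ⟨hres.1, le_trans hres.2.1 (le_of_lt hmid2), hres.2.2.1, hres.2.2.2⟩
      · have heq : lo = hi := by omega
        rw [pvBisectGo]
        simp only [hlh, dite_false]
        subst heq
        exact ⟨le_rfl, le_rfl, h1, h2⟩

theorem bisectVal_spec (P : List (Int × Int)) (x : Int) (hP : P.Pairwise pvLt) :
    pvBisectVal P x ≤ P.length ∧
    (∀ t, t < pvBisectVal P x → (P.getD t (0,0)).1 < x) ∧
    (∀ t, pvBisectVal P x ≤ t → t < P.length → x ≤ (P.getD t (0,0)).1) := by
  have hget : ∀ (t : Nat) (ht : t < P.length), P.getD t (0,0) = P[t]'ht := by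
    intro t ht
    rw [List.getD_eq_getElem?_getD, List.getElem?_eq_getElem ht]
    rfl
  have hmono : ∀ s t : Nat, s ≤ t → t < P.length → (P.getD s (0,0)).1 ≤ (P.getD t (0,0)).1 := by
    intro u t hut ht
    rcases Nat.lt_or_ge u t with h | h
    · have := (List.pairwise_iff_getElem.mp hP) u t (lt_trans h ht) ht h
      rw [hget u (lt_trans h ht), hget t ht]
      rcases this with h1 | h1
      · exact le_of_lt h1
      · exact le_of_eq h1.1
    · have : u = t := by omega
      rw [this]
  have := bisectGo_spec P x hmono 0 P.length (Nat.zero_le _) le_rfl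
    (fun t ht => absurd ht (Nat.not_lt_zero t)) (fun t ht htl => absurd (lt_of_le_of_lt ht htl) (lt_irrefl _))
  exact ⟨this.2.1, this.2.2.1, this.2.2.2⟩

theorem min2_pair (f g : Nat → Int) (t u : Nat) (d : Nat) :
    (PySem.List.min2? [t, u] f g).getD d =
      if f u < f t ∨ (f u = f t ∧ g u < g t) then u else t := by
  simp only [PySem.List.min2?, List.foldl_cons, List.foldl_nil]
  by_cases h1 : f u < f t
  · simp [h1]
  · by_cases h2 : f t < f u
    · have h3 : f u ≠ f t := ne_of_gt h2
      simp [h1, h2, h3]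
    · have heq : f u = f t := le_antisymm (not_lt.mp h2) (not_lt.mp h1)
      by_cases h3 : g u < g t
      · simp [h3, heq]
      · simp [h3, heq]

theorem bPick (a : Int) (P : List (Int × Int)) (hP : P.Pairwise pvLt)
    (hidx : (P.map Prod.snd).Nodup) (hne : P ≠ [])
    (j : Nat) (hj : j = pvBisectVal P a)
    (cand : List Nat) (hcand : cand =
      (if j < P.length then [j] else []) ++
      (if 0 < j then [pvBisectVal P (P.getD (j - 1) (0, 0)).1] else []))
    (best : Nat) (hbestdef : best = (PySem.List.min2? cand
        (fun t => |a - (P.getD t (0, 0)).1|) (fun t => (P.getD t (0, 0)).2)).getD 0) :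
    best < P.length ∧ ∀ q ∈ P, q ≠ P.getD best (0,0) → pvLt (pvKey a (P.getD best (0,0))) (pvKey a q) := by
  have hlen : 0 < P.length := List.length_pos_of_ne_nil hne
  obtain ⟨hjle, hjlt, hjge⟩ := bisectVal_spec P a hP
  rw [← hj] at hjle hjlt hjge
  have hget : ∀ (t : Nat) (ht : t < P.length), P.getD t (0,0) = P[t]'ht := by
    intro t ht
    rw [List.getD_eq_getElem?_getD, List.getElem?_eq_getElem ht]
    rfl
  have hmono : ∀ s t : Nat, s ≤ t → t < P.length → (P.getD s (0,0)).1 ≤ (P.getD t (0,0)).1 := by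
    intro u t hut ht
    rcases Nat.lt_or_ge u t with h | h
    · have := (List.pairwise_iff_getElem.mp hP) u t (lt_trans h ht) ht h
      rw [hget u (lt_trans h ht), hget t ht]
      rcases this with h1 | h1
      · exact le_of_lt h1
      · exact le_of_eq h1.1
    · have : u = t := by omega
      rw [this]
  have hsnd : ∀ s t : Nat, s < P.length → t < P.length → s ≠ t →
      (P.getD s (0,0)).2 ≠ (P.getD t (0,0)).2 := by
    intro u t hu ht hne' heq
    rw [hget u hu, hget t ht] at heq
    have h1 : (P.map Prod.snd)[u]'(by simpa using hu) = (P.map Prod.snd)[t]'(by simpa using ht) := by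
      simp [heq]
    exact hne' (hidx.getElem_inj_iff.mp h1)
  have hrun : ∀ s t : Nat, s < t → t < P.length → (P.getD s (0,0)).1 = (P.getD t (0,0)).1 →
      (P.getD s (0,0)).2 < (P.getD t (0,0)).2 := by
    intro u t hut ht hveq
    have := (List.pairwise_iff_getElem.mp hP) u t (lt_trans hut ht) ht hut
    rw [hget u (lt_trans hut ht), hget t ht] at hveq ⊢
    rcases this with h1 | h1
    · exact absurd hveq (ne_of_lt h1)
    · exact h1.2
  -- the pair at position j beats every later position
  have hright : ∀ t : Nat, j < P.length → j ≤ t → t < P.length → t ≠ j →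
      pvLt (pvKey a (P.getD j (0,0))) (pvKey a (P.getD t (0,0))) := by
    intro t hjlen hjt ht htj
    have hav : a ≤ (P.getD j (0,0)).1 := hjge j le_rfl hjlen
    have hat : a ≤ (P.getD t (0,0)).1 := hjge t hjt ht
    have hvv : (P.getD j (0,0)).1 ≤ (P.getD t (0,0)).1 := hmono j t hjt ht
    rcases lt_or_eq_of_le hvv with h | h
    · exact Or.inl (by simp only [pvKey]; rw [abs_of_nonpos (by omega), abs_of_nonpos (by omega)]; omega)
    · exact Or.inr ⟨by simp only [pvKey]; rw [h], hrun j t (by omega) ht h⟩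
  -- the left candidate k (first pair of the value run just below a) beats every position < j
  set k := pvBisectVal P (P.getD (j - 1) (0, 0)).1 with hkdef
  have hleft : 0 < j → k < P.length ∧
      (∀ t : Nat, t < j → t ≠ k → pvLt (pvKey a (P.getD k (0,0))) (pvKey a (P.getD t (0,0)))) := by
    intro h0
    obtain ⟨hkle, hklt, hkge⟩ := bisectVal_spec P (P.getD (j - 1) (0, 0)).1 hP
    rw [← hkdef] at hkle hklt hkge
    have hj1len : j - 1 < P.length := by omega
    have hkj1 : k ≤ j - 1 := by
      by_contra hcon
      exact lt_irrefl _ (hklt (j - 1) (by omega))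
    have hklen : k < P.length := by omega
    have hvk : (P.getD k (0,0)).1 = (P.getD (j - 1) (0,0)).1 :=
      le_antisymm (hmono k (j - 1) hkj1 hj1len) (hkge k le_rfl hklen)
    have hvja : (P.getD (j - 1) (0,0)).1 < a := hjlt (j - 1) (by omega)
    refine ⟨hklen, ?_⟩
    intro t htj htk
    have htlen : t < P.length := by omega
    have hta : (P.getD t (0,0)).1 < a := hjlt t htj
    have htle : (P.getD t (0,0)).1 ≤ (P.getD (j - 1) (0,0)).1 := hmono t (j - 1) (by omega) hj1len
    rcases lt_or_eq_of_le htle with h | h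
    · exact Or.inl (by simp only [pvKey]; rw [abs_of_nonneg (by omega), abs_of_nonneg (by omega)]; omega)
    · have hkt : k < t := by
        rcases Nat.lt_or_ge t k with hc | hc
        · exact absurd (h.trans hvk.symm ▸ hklt t hc) (by rw [← h] at hvk; omega)
        · omega
      refine Or.inr ⟨by simp only [pvKey]; rw [hvk, h], ?_⟩
      exact hrun k t hkt htlen (by rw [hvk, h])
  by_cases hjlen : j < P.length
  · by_cases h0 : 0 < j
    · -- two candidates
      obtain ⟨hklen, hkdom⟩ := hleft h0
      rw [hcand, if_pos hjlen, if_pos h0] at hbestdef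
      simp only [List.singleton_append] at hbestdef
      rw [min2_pair] at hbestdef
      have hcond : ((fun t => |a - (P.getD t (0, 0)).1|) k < (fun t => |a - (P.getD t (0, 0)).1|) j ∨
          ((fun t => |a - (P.getD t (0, 0)).1|) k = (fun t => |a - (P.getD t (0, 0)).1|) j ∧
           (fun t => (P.getD t (0, 0)).2) k < (fun t => (P.getD t (0, 0)).2) j)) ↔
          pvLt (pvKey a (P.getD k (0,0))) (pvKey a (P.getD j (0,0))) := Iff.rfl
      by_cases hc : pvLt (pvKey a (P.getD k (0,0))) (pvKey a (P.getD j (0,0)))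
      · have hb : best = k := by rw [hbestdef, if_pos (hcond.mpr hc)]
        rw [hb]
        refine ⟨hklen, ?_⟩
        intro q hq hqne
        obtain ⟨t, ht, rfl⟩ := List.mem_iff_getElem.mp hq
        rw [← hget t ht]
        rcases Nat.lt_or_ge t j with htj | htj
        · rcases eq_or_ne t k with heq | htk
          · exact absurd ((hget t ht).symm.trans (by rw [heq])) hqne
          · exact hkdom t htj htk
        · rcases eq_or_ne t j with heq | htj'
          · rw [heq]; exact hc
          · exact pvLt_trans hc (hright t hjlen htj ht htj')
      · have hb : best = j := by rw [hbestdef, if_neg (fun h => hc (hcond.mp h))]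
        rw [hb]
        have hkj : k ≠ j := by
          obtain ⟨hkle', hklt', hkge'⟩ := bisectVal_spec P (P.getD (j - 1) (0, 0)).1 hP
          rw [← hkdef] at hklt'
          intro h
          exact lt_irrefl _ (hklt' (j - 1) (by omega)) |>.elim
        have hjk : pvLt (pvKey a (P.getD j (0,0))) (pvKey a (P.getD k (0,0))) := by
          apply pvLt_of_ne_of_not_gt _ hc
          intro h
          exact hsnd j k hjlen hklen (Ne.symm hkj) (by simpa [pvKey] using congrArg Prod.snd h)
        refine ⟨hjlen, ?_⟩
        intro q hq hqne
        obtain ⟨t, ht, rfl⟩ := List.mem_iff_getElem.mp hq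
        rw [← hget t ht]
        rcases Nat.lt_or_ge t j with htj | htj
        · rcases eq_or_ne t k with heq | htk
          · rw [heq]; exact hjk
          · exact pvLt_trans hjk (hkdom t htj htk)
        · rcases eq_or_ne t j with heq | htj'
          · exact absurd ((hget t ht).symm.trans (by rw [heq])) hqne
          · exact hright t hjlen htj ht htj'
    · -- only the right candidate: j = 0
      rw [hcand, if_pos hjlen, if_neg h0] at hbestdef
      simp only [List.append_nil] at hbestdef
      have hb : best = j := by rw [hbestdef]; rfl
      rw [hb]
      refine ⟨hjlen, ?_⟩
      intro q hq hqne
      obtain ⟨t, ht, rfl⟩ := List.mem_iff_getElem.mp hq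
      rw [← hget t ht]
      rcases eq_or_ne t j with heq | htj'
      · exact absurd ((hget t ht).symm.trans (by rw [heq])) hqne
      · exact hright t hjlen (by omega) ht htj'
  · -- only the left candidate: j = len > 0
    have h0 : 0 < j := by omega
    obtain ⟨hklen, hkdom⟩ := hleft h0
    rw [hcand, if_neg hjlen, if_pos h0] at hbestdef
    simp only [List.nil_append] at hbestdef
    have hb : best = k := by rw [hbestdef]; rfl
    rw [hb]
    refine ⟨hklen, ?_⟩
    intro q hq hqne
    obtain ⟨t, ht, rfl⟩ := List.mem_iff_getElem.mp hq
    rw [← hget t ht]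
    rcases eq_or_ne t k with heq | htk
    · exact absurd ((hget t ht).symm.trans (by rw [heq])) hqne
    · exact hkdom t (by omega) htk

-- ---- bridge and erase lemmas ----

theorem erase_getD_eraseIdx (P : List (Int × Int)) (n : Nat) (hn : n < P.length) (hnd : P.Nodup) :
    P.erase (P.getD n (0,0)) = P.take n ++ P.drop (n + 1) := by
  have hget : P.getD n (0,0) = P[n]'hn := by
    rw [List.getD_eq_getElem?_getD, List.getElem?_eq_getElem hn]
    rfl
  have hsplit : P.take n ++ P[n] :: P.drop (n + 1) = P := by simp
  have hnotin : P[n] ∉ P.take n := by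
    intro hmem
    have hnd' : (P.take n ++ P[n] :: P.drop (n + 1)).Nodup := by rw [hsplit]; exact hnd
    obtain ⟨-, -, hdisj⟩ := List.nodup_append.mp hnd'
    exact hdisj _ hmem _ List.mem_cons_self rfl
  rw [hget]
  calc P.erase (P[n]'hn) = (P.take n ++ P[n] :: P.drop (n + 1)).erase P[n] := by rw [hsplit]
    _ = P.take n ++ ((P[n] :: P.drop (n + 1)).erase P[n]) := List.erase_append_right _ hnotin
    _ = P.take n ++ P.drop (n + 1) := by rw [List.erase_cons_head]

theorem sorted2_pairwise_le (xs : List (Int × Int)) :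
    (PySem.List.sorted2 xs Prod.fst Prod.snd false).Pairwise (fun p q => ¬ pvLt q p) := by
  have hbe : (fun (a b : Int × Int) => decide (a.1 < b.1) || (!decide (b.1 < a.1) && decide (a.2 < b.2))) =
      (fun (a b : Int × Int) => decide ((toLex a : Lex (Int × Int)) < toLex b)) := by
    funext p q
    obtain ⟨a, b⟩ := p; obtain ⟨c, d⟩ := q
    rw [Bool.eq_iff_iff]
    simp only [Bool.or_eq_true, Bool.and_eq_true, Bool.not_eq_true', decide_eq_true_eq,
      decide_eq_false_iff_not, Prod.Lex.lt_iff, ofLex_toLex]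
    constructor
    · rintro (h | ⟨h1, h2⟩)
      · exact Or.inl h
      · rcases lt_trichotomy a c with h3 | h3 | h3
        · exact Or.inl h3
        · exact Or.inr ⟨h3, h2⟩
        · exact absurd h3 h1
    · rintro (h | ⟨h1, h2⟩)
      · exact Or.inl h
      · exact Or.inr ⟨by omega, h2⟩
  have hstep : ∀ (ys acc : List (Int × Int)),
      acc.Pairwise (fun p q => (toLex p : Lex (Int × Int)) ≤ toLex q) →
      (ys.foldl (fun acc x => PySem.List.insertBy
          (fun (a b : Int × Int) => decide ((toLex a : Lex (Int × Int)) < toLex b)) x acc) acc).Pairwise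
        (fun p q => (toLex p : Lex (Int × Int)) ≤ toLex q) := by
    intro ys
    induction ys with
    | nil => intro acc h; exact h
    | cons x ys ih =>
        intro acc h
        exact ih _ (PySem.List.insertBy_pairwise_le (fun p => (toLex p : Lex (Int × Int))) x acc h)
  have hres : (PySem.List.sorted2 xs Prod.fst Prod.snd false).Pairwise
      (fun p q => (toLex p : Lex (Int × Int)) ≤ toLex q) := by
    show (xs.foldl (fun acc x => PySem.List.insertBy
        (fun (a b : Int × Int) => decide (a.1 < b.1) || (!decide (b.1 < a.1) && decide (a.2 < b.2))) x acc) []).Pairwise _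
    rw [hbe]
    exact hstep xs [] List.Pairwise.nil
  refine hres.imp ?_
  intro p q h hlt
  obtain ⟨a, b⟩ := p; obtain ⟨c, d⟩ := q
  rw [Prod.Lex.le_iff] at h
  simp only [ofLex_toLex] at h
  unfold pvLt at hlt
  dsimp only at hlt h
  omega

theorem pvInv_init (L : List Int) :
    pvInv L (PySem.List.pyRange 0 (L.length : Int) 1)
      (PySem.List.sorted2 ((PySem.List.enumerate L).map (fun p => (p.2, p.1))) Prod.fst Prod.snd) := by
  have hS : (PySem.List.pyRange 0 (L.length : Int) 1).Pairwise (· < ·) :=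
    PySem.List.pairwise_lt_pyRange_one 0 (L.length : Int)
  have hM : ((PySem.List.enumerate L).map (fun p => (p.2, p.1))) =
      (PySem.List.pyRange 0 (L.length : Int) 1).map (pvF L) := by
    rw [PySem.List.enumerate_eq_map_pyRange L 0, List.map_map]
    simp [Function.comp, pvF, pvVal, PySem.List.pyGetD, PySem.List.len]
  have hperm : (PySem.List.sorted2 ((PySem.List.enumerate L).map (fun p => (p.2, p.1))) Prod.fst Prod.snd).Perm
      ((PySem.List.pyRange 0 (L.length : Int) 1).map (pvF L)) := by
    rw [← hM]
    exact PySem.List.sorted2_perm _ _ _ _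
  have hnodup : (PySem.List.sorted2 ((PySem.List.enumerate L).map (fun p => (p.2, p.1))) Prod.fst Prod.snd).Nodup := by
    apply hperm.nodup_iff.mpr
    exact List.Nodup.map (pvF_inj L) (hS.imp fun h => ne_of_lt h)
  refine ⟨hS, ?_, hperm⟩
  have hle := sorted2_pairwise_le ((PySem.List.enumerate L).map (fun p => (p.2, p.1)))
  exact (hle.and hnodup).imp fun h => pvLt_of_ne_of_not_gt h.2 h.1

-- ---- main loop ----

def pvBest (P : List (Int × Int)) (a : Int) : Nat :=
  (PySem.List.min2?
    ((if pvBisectVal P a < P.length then [pvBisectVal P a] else []) ++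
     (if 0 < pvBisectVal P a then [pvBisectVal P (P.getD (pvBisectVal P a - 1) (0, 0)).1] else []))
    (fun t => |a - (P.getD t (0, 0)).1|) (fun t => (P.getD t (0, 0)).2)).getD 0

theorem foldl_congr_init {α β γ : Type} (f : γ → α → γ) (sh : List α) (pr : γ → β)
    {s1 s2 : γ} (h : s1 = s2) : pr (List.foldl f s1 sh) = pr (List.foldl f s2 sh) := by rw [h]

theorem mainLoop (L : List Int) :
    ∀ (sh : List Int) (acc : List Int) (S : List Int) (P : List (Int × Int)), pvInv L S P →
      (sh.foldl (fun (st : List Int × List Int) a_val =>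
          match (st.2.foldl (pvAStep a_val L) (none, none)).2 with
          | some c => (st.1 ++ [c], (PySem.List.remove? st.2 c).getD st.2)
          | none => st) (acc, S)).1 =
      (sh.foldl (fun (st : List Int × List (Int × Int)) a =>
          let pairs := st.2
          if pairs.isEmpty then st
          else
            let j := pvBisectVal pairs a
            let cand : List Nat :=
              (if j < pairs.length then [j] else []) ++
              (if 0 < j then [pvBisectVal pairs (pairs.getD (j - 1) (0, 0)).1] else [])
            let best := (PySem.List.min2? cand
                (fun t => |a - (pairs.getD t (0, 0)).1|) (fun t => (pairs.getD t (0, 0)).2)).getD 0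
            (st.1 ++ [(pairs.getD best (0, 0)).2],
             pairs.take best ++ pairs.drop (best + 1))) (acc, P)).1 := by
  intro sh
  induction sh with
  | nil => intro acc S P _; rfl
  | cons a sh ih =>
      intro acc S P hInv
      obtain ⟨hS, hPpw, hperm⟩ := hInv
      rw [List.foldl_cons, List.foldl_cons]
      by_cases hS0 : S = []
      · subst hS0
        have hP0 : P = [] := hperm.eq_nil
        subst hP0
        exact ih acc [] [] ⟨List.Pairwise.nil, List.Pairwise.nil, List.Perm.refl []⟩
      · have hPne : P ≠ [] := by
          intro h
          subst h
          have : S.map (pvF L) = [] := (hperm.symm).eq_nil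
          exact hS0 (List.map_eq_nil_iff.mp this)
        have hPE : P.isEmpty = false := by
          cases P with
          | nil => exact absurd rfl hPne
          | cons x t => rfl
        obtain ⟨c, hceq, hcS, hcmin⟩ := scanChar L a S hS hS0
        have hidx : (P.map Prod.snd).Nodup := by
          have hp2 : (P.map Prod.snd).Perm (S.map (Prod.snd ∘ pvF L)) := by
            have := hperm.map Prod.snd
            rwa [List.map_map] at this
          have hid : S.map (Prod.snd ∘ pvF L) = S := by
            rw [show Prod.snd ∘ pvF L = id from funext fun i => rfl, List.map_id]
          rw [hid] at hp2
          exact hp2.nodup_iff.mpr (hS.imp fun h => ne_of_lt h)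
        obtain ⟨hbl, hbmin⟩ := bPick a P hPpw hidx hPne (pvBisectVal P a) rfl _ rfl (pvBest P a) rfl
        have hgetb : P.getD (pvBest P a) (0,0) = P[pvBest P a]'hbl := by
          rw [List.getD_eq_getElem?_getD, List.getElem?_eq_getElem hbl]
          rfl
        have hbmem : P.getD (pvBest P a) (0,0) ∈ P := by
          rw [hgetb]; exact List.getElem_mem hbl
        obtain ⟨c', hc'S, hc'eq⟩ := List.mem_map.mp (hperm.mem_iff.mp hbmem)
        have hcc : c' = c := by
          by_contra hne'
          have h1 : pvLt (pvKey a (pvF L c)) (pvKey a (pvF L c')) := hcmin c' hc'S hne'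
          have h2 : pvLt (pvKey a (P.getD (pvBest P a) (0,0))) (pvKey a (pvF L c)) := by
            apply hbmin (pvF L c) (hperm.mem_iff.mpr (List.mem_map_of_mem hcS))
            intro heq
            exact hne' (pvF_inj L (hc'eq.trans heq.symm))
          rw [← hc'eq] at h2
          exact pvLt_asymm h1 h2
        have hbP : P.getD (pvBest P a) (0,0) = pvF L c := by rw [← hc'eq, hcc]
        have hsnd2 : (P.getD (pvBest P a) (0,0)).2 = c := by rw [hbP]; rfl
        have hPnodup : P.Nodup :=
          (hperm.nodup_iff).mpr (List.Nodup.map (pvF_inj L) (hS.imp fun h => ne_of_lt h))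
        have hPtd : P.take (pvBest P a) ++ P.drop (pvBest P a + 1) = P.erase (pvF L c) := by
          rw [← hbP, erase_getD_eraseIdx P (pvBest P a) hbl hPnodup]
        have hInv' : pvInv L (S.erase c) (P.take (pvBest P a) ++ P.drop (pvBest P a + 1)) := by
          refine ⟨List.Pairwise.sublist (List.erase_sublist) hS, ?_, ?_⟩
          · rw [← List.eraseIdx_eq_take_drop_succ P (pvBest P a)]
            exact List.Pairwise.sublist (List.eraseIdx_sublist P (pvBest P a)) hPpw
          · rw [hPtd, List.map_erase (pvF_inj L)]
            exact hperm.erase (pvF L c)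
        have hA : (match (S.foldl (pvAStep a L) (none, none)).2 with
            | some c => (acc ++ [c], (PySem.List.remove? S c).getD S)
            | none => (acc, S)) = (acc ++ [c], S.erase c) := by
          rw [hceq]
          show (acc ++ [c], (PySem.List.remove? S c).getD S) = (acc ++ [c], S.erase c)
          rw [PySem.List.remove?_eq_some_erase S c hcS]
          rfl
        have hB : (if P.isEmpty = true then (acc, P) else
            (acc ++ [(P.getD (pvBest P a) (0, 0)).2],
             P.take (pvBest P a) ++ P.drop (pvBest P a + 1)))
            = (acc ++ [c], P.take (pvBest P a) ++ P.drop (pvBest P a + 1)) := by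
          rw [hPE, if_neg (by simp : ¬(false = true)), hsnd2]
        exact Eq.trans (foldl_congr_init _ sh Prod.fst hA)
          (Eq.trans (ih (acc ++ [c]) (S.erase c) (P.take (pvBest P a) ++ P.drop (pvBest P a + 1)) hInv')
            (foldl_congr_init _ sh Prod.fst hB).symm)

-- ===== VERDICT (by name: the statement is the Claim_ definition above) =====
theorem match_timestamp_spec : Claim_equal_match_timestamp := by
  intro short_ts long_ts _
  unfold Spec_match_timestamp match_timestamp match_timestamp_alt
  exact mainLoop long_ts short_ts [] _ _ (pvInv_init long_ts)
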